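-- pv_equiv track=rewrite | github.com/islas104/epc-data-import-pipeline | land-ownership/corporate_land_ownership.py | get_total_land
-- ===== SOURCE A (Python) =====
-- def get_total_land(company_id, company_relations, land_ownership):
--     visited = set()
--     total_land = set()
--
--     def dfs(company_id):
--         if company_id in visited:
--             return
--         visited.add(company_id)
--         # Add the land directly owned by this company
--         if company_id in land_ownership:
--             total_land.update(land_ownership[company_id])
--         # Recurse for all child companies
--         for child_company in company_relations.get(company_id, []):
--             dfs(child_company)
--
--     dfs(company_id)
--     return len(total_land)
-- ===== SOURCE B (Python) =====
-- def get_total_land(company_id, company_relations, land_ownership):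
--     # phase 1: compute the set of companies reachable from company_id with a worklist
--     reachable = set()
--     stack = [company_id]
--     while stack:
--         company = stack.pop()
--         if company in reachable:
--             continue
--         reachable.add(company)
--         stack.extend(reversed(company_relations.get(company, [])))
--     # phase 2: union the land parcels owned by every reachable company
--     total = set()
--     for company in reachable:
--         total.update(land_ownership.get(company, ()))
--     return len(total)
-- ===== Notes on version B (the rewrite author's own statement) =====
-- stated objective: alternative
-- what changed: Replaces the recursive dfs that interleaves visiting and land accumulation in one closure by a two-phase algorithm: an iterative worklist computes the reachable-company set alone, then a second pass unions the land lists of the reachable companies; no recursion depth limit.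
import Mathlib
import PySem

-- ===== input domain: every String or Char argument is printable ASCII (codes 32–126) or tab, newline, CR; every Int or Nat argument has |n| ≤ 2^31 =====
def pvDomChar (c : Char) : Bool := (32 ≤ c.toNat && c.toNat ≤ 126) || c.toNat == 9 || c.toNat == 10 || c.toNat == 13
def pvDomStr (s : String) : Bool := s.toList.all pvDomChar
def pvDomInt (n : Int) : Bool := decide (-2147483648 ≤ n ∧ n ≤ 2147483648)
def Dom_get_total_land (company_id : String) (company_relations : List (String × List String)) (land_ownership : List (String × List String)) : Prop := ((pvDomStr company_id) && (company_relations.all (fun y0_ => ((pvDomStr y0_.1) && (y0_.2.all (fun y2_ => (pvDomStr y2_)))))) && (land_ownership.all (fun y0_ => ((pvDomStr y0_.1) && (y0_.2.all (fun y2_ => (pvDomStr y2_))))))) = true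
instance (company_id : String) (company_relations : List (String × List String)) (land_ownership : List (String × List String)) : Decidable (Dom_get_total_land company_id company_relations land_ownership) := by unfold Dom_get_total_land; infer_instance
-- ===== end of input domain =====

-- B replaces A's recursive dfs (which interleaves visiting and land accumulation in one closure)
-- by a two-phase algorithm: an iterative worklist computes the reachable-company set alone, then a
-- second pass unions the land lists of the reachable companies; same cost, alternative decomposition.


-- ===== PORT A =====
-- finite universe of every node the traversal can ever reach: the root and all children
-- occurring in the relations dict (used only to size the totality fuel of both ports)
def pvUniverse (company_id : String) (rel : List (String × List String)) : List String :=
  company_id :: rel.flatMap (fun p => p.2)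

-- A's inner recursive dfs; the Nat argument is a totality fuel (never exhausted when the
-- fuel exceeds the number of distinct reachable nodes, as in get_total_land below)
def pvDfsA (rel land : List (String × List String)) :
    Nat → String → (PySem.Set String × PySem.Set String) → (PySem.Set String × PySem.Set String)
  | 0, _, s => s
  | f + 1, c, s =>
    if PySem.Set.contains s.1 c then s
    else
      let visited := PySem.Set.add s.1 c
      let total :=
        if (PySem.Dict.mk land).contains c then
          PySem.Set.update s.2 ((PySem.Dict.mk land).getD c [])
        else s.2
      ((PySem.Dict.mk rel).getD c []).foldl (fun st ch => pvDfsA rel land f ch st) (visited, total)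

def get_total_land (company_id : String) (company_relations : List (String × List String)) (land_ownership : List (String × List String)) : Int :=
  PySem.Set.len (pvDfsA company_relations land_ownership
    ((pvUniverse company_id company_relations).length + 1)
    company_id (PySem.Set.empty, PySem.Set.empty)).2

-- ===== PORT B =====
-- bound on the length of any children list looked up in the relations dict (fuel sizing only)
def pvChildSum (rel : List (String × List String)) : Nat :=
  (rel.map (fun p => p.2.length)).sum

-- land_ownership.get(c, ()) of B's phase 2
def pvLandOf (land : List (String × List String)) (c : String) : List String :=
  (PySem.Dict.mk land).getD c []

-- B's phase-1 while loop: a worklist computing only the reachable set (head of the list =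
-- top of the Python stack, so extend(reversed(children)) then pop() is 'children ++ stack');
-- the Nat fuel is a totality guard, never exhausted for the fuel used in get_total_land_alt
def pvReach (rel : List (String × List String)) :
    Nat → List String → PySem.Set String → PySem.Set String
  | 0, _, v => v
  | _ + 1, [], v => v
  | f + 1, c :: stack, v =>
    if PySem.Set.contains v c then pvReach rel f stack v
    else pvReach rel f (((PySem.Dict.mk rel).getD c []) ++ stack) (PySem.Set.add v c)

def get_total_land_alt (company_id : String) (company_relations : List (String × List String)) (land_ownership : List (String × List String)) : Int :=
  let reachable := pvReach company_relations
    (((pvUniverse company_id company_relations).length + 1) * (pvChildSum company_relations + 1) + 1)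
    [company_id] PySem.Set.empty
  -- phase 2: for company in reachable: total.update(land_ownership.get(company, ()))
  let total := reachable.foldl
    (fun t c => PySem.Set.update t (pvLandOf land_ownership c)) PySem.Set.empty
  PySem.Set.len total

-- ===== PRECONDITION & SPEC =====
def Spec_get_total_land (company_id : String) (company_relations : List (String × List String)) (land_ownership : List (String × List String)) (out : Int) : Prop := out = get_total_land_alt company_id company_relations land_ownership
instance (company_id : String) (company_relations : List (String × List String)) (land_ownership : List (String × List String)) (out : Int) : Decidable (Spec_get_total_land company_id company_relations land_ownership out) := by unfold Spec_get_total_land; infer_instance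

-- ===== CLAIM (what is proved, stated in full; the proofs are below) =====
def Claim_equal_get_total_land : Prop := ∀ (company_id : String) (company_relations : List (String × List String)) (land_ownership : List (String × List String)), Dom_get_total_land company_id company_relations land_ownership → Spec_get_total_land company_id company_relations land_ownership (get_total_land company_id company_relations land_ownership)

-- ===== LEMMAS AND PROOFS =====

-- proof-only intermediate: A's loop with the pair state but B's iterative stack control;
-- it simulates A's dfs (pvLoop_eq_pvDfsL) and projects onto B's phase-1 loop (pvReach_eq_fst)
def pvLoop (rel land : List (String × List String)) :
    Nat → List String → (PySem.Set String × PySem.Set String) → (PySem.Set String × PySem.Set String)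
  | 0, _, s => s
  | _ + 1, [], s => s
  | f + 1, c :: stack, s =>
    if PySem.Set.contains s.1 c then pvLoop rel land f stack s
    else
      let visited := PySem.Set.add s.1 c
      let total := PySem.Set.update s.2 ((PySem.Dict.mk land).getD c [])
      pvLoop rel land f (((PySem.Dict.mk rel).getD c []) ++ stack) (visited, total)

-- fold of the dfs over a list of nodes (A's 'for child_company in …: dfs(child_company)')
def pvDfsL (rel land : List (String × List String)) (f : Nat) (cs : List String)
    (s : PySem.Set String × PySem.Set String) : PySem.Set String × PySem.Set String :=
  cs.foldl (fun st ch => pvDfsA rel land f ch st) s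

-- nodes of U still unvisited in state s (the termination measure)
def pvMissing (U : List String) (s : PySem.Set String × PySem.Set String) : Nat :=
  (U.toFinset \ s.1.toFinset).card

theorem pvDfsL_nil (rel land : List (String × List String)) (f : Nat) (s : PySem.Set String × PySem.Set String) :
    pvDfsL rel land f [] s = s := rfl

theorem pvDfsL_cons (rel land : List (String × List String)) (f : Nat) (c : String) (cs : List String)
    (s : PySem.Set String × PySem.Set String) :
    pvDfsL rel land f (c :: cs) s = pvDfsL rel land f cs (pvDfsA rel land f c s) := rfl

theorem pvDfsL_append (rel land : List (String × List String)) (f : Nat) (cs ds : List String)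
    (s : PySem.Set String × PySem.Set String) :
    pvDfsL rel land f (cs ++ ds) s = pvDfsL rel land f ds (pvDfsL rel land f cs s) :=
  List.foldl_append

theorem pvDfsA_succ (rel land : List (String × List String)) (f : Nat) (c : String)
    (s : PySem.Set String × PySem.Set String) :
    pvDfsA rel land (f + 1) c s =
      if PySem.Set.contains s.1 c then s
      else
        pvDfsL rel land f ((PySem.Dict.mk rel).getD c [])
          (PySem.Set.add s.1 c,
           if (PySem.Dict.mk land).contains c then
             PySem.Set.update s.2 ((PySem.Dict.mk land).getD c [])
           else s.2) := rfl

theorem pvDfsA_visited_mono (rel land : List (String × List String)) :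
    ∀ (f : Nat) (c : String) (s : PySem.Set String × PySem.Set String) (x : String),
      x ∈ s.1 → x ∈ (pvDfsA rel land f c s).1 := by
  intro f
  induction f with
  | zero => intro c s x hx; simpa [pvDfsA] using hx
  | succ f ih =>
    intro c s x hx
    rw [pvDfsA_succ]
    split
    · exact hx
    · have hfold : ∀ (cs : List String) (s' : PySem.Set String × PySem.Set String),
          x ∈ s'.1 → x ∈ (pvDfsL rel land f cs s').1 := by
        intro cs
        induction cs with
        | nil => intro s' h; simpa [pvDfsL_nil] using h
        | cons a as iha => intro s' h; rw [pvDfsL_cons]; exact iha _ (ih a s' x h)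
      exact hfold _ _ (by simp [PySem.Set.mem_add]; exact Or.inl hx)

theorem pvMissing_mono (U : List String) (s t : PySem.Set String × PySem.Set String)
    (h : ∀ x ∈ s.1, x ∈ t.1) : pvMissing U t ≤ pvMissing U s := by
  apply Finset.card_le_card
  intro x hx
  simp only [Finset.mem_sdiff, List.mem_toFinset] at hx ⊢
  exact ⟨hx.1, fun hxs => hx.2 (h x hxs)⟩

theorem pvMissing_lt_of_add (U : List String) (s : PySem.Set String × PySem.Set String)
    (c : String) (t : PySem.Set String) (hc : c ∈ U) (hv : c ∉ s.1) :
    pvMissing U (PySem.Set.add s.1 c, t) < pvMissing U s := by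
  apply Finset.card_lt_card
  rw [Finset.ssubset_def]
  constructor
  · intro x hx
    simp only [Finset.mem_sdiff, List.mem_toFinset, PySem.Set.mem_add] at hx ⊢
    exact ⟨hx.1, fun hxs => hx.2 (Or.inl hxs)⟩
  · intro hsub
    have hc0 : c ∈ U.toFinset \ List.toFinset s.1 := by
      simp only [Finset.mem_sdiff, List.mem_toFinset]; exact ⟨hc, hv⟩
    have hc' := hsub hc0
    simp [Finset.mem_sdiff, List.mem_toFinset, PySem.Set.mem_add] at hc'

theorem pvMissing_le_len (U : List String) (s : PySem.Set String × PySem.Set String) :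
    pvMissing U s ≤ U.length := by
  exact le_trans (Finset.card_le_card Finset.sdiff_subset) (List.toFinset_card_le U)

theorem pvRelD_mem_universe (cid : String) (rel : List (String × List String)) (c x : String)
    (hx : x ∈ (PySem.Dict.mk rel).getD c []) : x ∈ pvUniverse cid rel := by
  induction rel with
  | nil => simp [PySem.Dict.getD_eq_get?_getD, PySem.Dict.get?] at hx
  | cons p ps ihp =>
    rw [PySem.Dict.getD_eq_get?_getD] at hx
    rcases p with ⟨k, vs⟩
    rw [PySem.Dict.get?_mk_cons] at hx
    simp only [pvUniverse, List.mem_cons, List.flatMap_cons, List.mem_append]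
    by_cases hk : (k == c) = true
    · simp only [hk, if_pos] at hx
      exact Or.inr (Or.inl (by simpa using hx))
    · simp only [hk, if_neg, Bool.false_eq_true, not_false_iff] at hx
      have := ihp (by rw [PySem.Dict.getD_eq_get?_getD]; exact hx)
      simp only [pvUniverse, List.mem_cons, List.mem_flatMap] at this
      rcases this with h | h
      · exact Or.inl h
      · exact Or.inr (Or.inr (by simpa [List.mem_flatMap] using h))

theorem pvRelD_len_le (rel : List (String × List String)) (c : String) :
    ((PySem.Dict.mk rel).getD c []).length ≤ pvChildSum rel := by
  induction rel with
  | nil => simp [PySem.Dict.getD_eq_get?_getD, PySem.Dict.get?, pvChildSum]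
  | cons p ps ihp =>
    rw [PySem.Dict.getD_eq_get?_getD]
    rcases p with ⟨k, vs⟩
    rw [PySem.Dict.get?_mk_cons]
    simp only [pvChildSum, List.map_cons, List.sum_cons]
    by_cases hk : (k == c) = true
    · simp [hk]
    · simp only [hk, if_neg, Bool.false_eq_true, not_false_iff]
      have := ihp
      rw [PySem.Dict.getD_eq_get?_getD] at this
      simp only [pvChildSum] at this
      omega

-- fuel irrelevance: once the fuel exceeds the number of unvisited universe nodes, its value is immaterial
theorem pvDfsA_fuel_irrel (rel land : List (String × List String)) (U : List String) :
    ∀ (f1 f2 : Nat) (c : String) (s : PySem.Set String × PySem.Set String),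
      c ∈ U → (∀ c' x, x ∈ (PySem.Dict.mk rel).getD c' [] → x ∈ U) →
      pvMissing U s < f1 → pvMissing U s < f2 →
      pvDfsA rel land f1 c s = pvDfsA rel land f2 c s := by
  intro f1
  induction f1 with
  | zero => intro f2 c s _ _ h1 _; omega
  | succ f1 ih =>
    intro f2 c s hc hU h1 h2
    match f2, h2 with
    | 0, h2 => omega
    | f2 + 1, h2 =>
      rw [pvDfsA_succ, pvDfsA_succ]
      by_cases hvis : PySem.Set.contains s.1 c = true
      · rw [if_pos hvis, if_pos hvis]
      · rw [if_neg hvis, if_neg hvis]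
        have hv : c ∉ s.1 := fun hmem => hvis ((PySem.Set.contains_iff s.1 c).mpr hmem)
        have hmiss := pvMissing_lt_of_add U s c
          (if (PySem.Dict.mk land).contains c then
             PySem.Set.update s.2 ((PySem.Dict.mk land).getD c [])
           else s.2) hc hv
        have haux : ∀ (cs : List String) (s' : PySem.Set String × PySem.Set String),
            (∀ x ∈ cs, x ∈ U) → pvMissing U s' < f1 → pvMissing U s' < f2 →
            pvDfsL rel land f1 cs s' = pvDfsL rel land f2 cs s' := by
          intro cs
          induction cs with
          | nil => intro s' _ _ _; rfl
          | cons a as iha =>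
            intro s' hcs hm1 hm2
            rw [pvDfsL_cons, pvDfsL_cons,
              ih f2 a s' (hcs a (List.mem_cons_self)) hU hm1 hm2]
            apply iha _ (fun x hx => hcs x (List.mem_cons_of_mem a hx))
            · exact lt_of_le_of_lt (pvMissing_mono U s' _
                (fun x hx => pvDfsA_visited_mono rel land f2 a s' x hx)) hm1
            · exact lt_of_le_of_lt (pvMissing_mono U s' _
                (fun x hx => pvDfsA_visited_mono rel land f2 a s' x hx)) hm2
        exact haux _ _ (fun x hx => hU c x hx) (by omega) (by omega)

theorem pvDfsL_fuel_irrel (rel land : List (String × List String)) (U : List String)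
    (hU : ∀ c' x, x ∈ (PySem.Dict.mk rel).getD c' [] → x ∈ U)
    (f1 f2 : Nat) :
    ∀ (cs : List String) (s : PySem.Set String × PySem.Set String),
      (∀ x ∈ cs, x ∈ U) → pvMissing U s < f1 → pvMissing U s < f2 →
      pvDfsL rel land f1 cs s = pvDfsL rel land f2 cs s := by
  intro cs
  induction cs with
  | nil => intro s _ _ _; rfl
  | cons a as iha =>
    intro s hcs hm1 hm2
    rw [pvDfsL_cons, pvDfsL_cons,
      pvDfsA_fuel_irrel rel land U f1 f2 a s (hcs a (List.mem_cons_self)) hU hm1 hm2]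
    apply iha _ (fun x hx => hcs x (List.mem_cons_of_mem a hx))
    · exact lt_of_le_of_lt (pvMissing_mono U s _
        (fun x hx => pvDfsA_visited_mono rel land f2 a s x hx)) hm1
    · exact lt_of_le_of_lt (pvMissing_mono U s _
        (fun x hx => pvDfsA_visited_mono rel land f2 a s x hx)) hm2

-- A's guarded land update equals the unguarded one (update with the empty default is the identity)
theorem pvLand_update_eq (land : List (String × List String)) (c : String) (t : PySem.Set String) :
    (if (PySem.Dict.mk land).contains c then
       PySem.Set.update t ((PySem.Dict.mk land).getD c [])
     else t) = PySem.Set.update t ((PySem.Dict.mk land).getD c []) := by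
  by_cases h : (PySem.Dict.mk land).contains c = true
  · simp [h]
  · rw [if_neg h, PySem.Dict.getD_of_not_contains _ _ (eq_false_of_ne_true h)]
    rfl

-- the pair-state stack loop simulates the dfs fold on the stack contents
theorem pvLoop_eq_pvDfsL (cid : String) (rel land : List (String × List String)) :
    ∀ (f : Nat) (stack : List String) (s : PySem.Set String × PySem.Set String),
      (∀ x ∈ stack, x ∈ pvUniverse cid rel) →
      stack.length + pvMissing (pvUniverse cid rel) s * (pvChildSum rel + 1) < f →
      pvLoop rel land f stack s =
        pvDfsL rel land ((pvUniverse cid rel).length + 1) stack s := by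
  intro f
  induction f with
  | zero => intro stack s _ hb; omega
  | succ f ih =>
    intro stack s hst hb
    match stack with
    | [] => rfl
    | c :: rest =>
      have hcU : c ∈ pvUniverse cid rel := hst c List.mem_cons_self
      by_cases hvis : PySem.Set.contains s.1 c = true
      · show pvLoop rel land (f + 1) (c :: rest) s = _
        rw [pvLoop, if_pos hvis, pvDfsL_cons, pvDfsA_succ, if_pos hvis]
        exact ih rest s (fun x hx => hst x (List.mem_cons_of_mem c hx)) (by
          simp only [List.length_cons] at hb; omega)
      · have hv : c ∉ s.1 := fun hmem => hvis ((PySem.Set.contains_iff s.1 c).mpr hmem)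
        have hchU : ∀ x ∈ (PySem.Dict.mk rel).getD c [], x ∈ pvUniverse cid rel :=
          fun x hx => pvRelD_mem_universe cid rel c x hx
        have hchlen := pvRelD_len_le rel c
        have hmiss := pvMissing_lt_of_add (pvUniverse cid rel) s c
          (PySem.Set.update s.2 ((PySem.Dict.mk land).getD c [])) hcU hv
        have hmU := pvMissing_le_len (pvUniverse cid rel) s
        show pvLoop rel land (f + 1) (c :: rest) s = _
        rw [pvLoop, if_neg hvis]
        rw [pvDfsL_cons, pvDfsA_succ, if_neg hvis, pvLand_update_eq]
        rw [pvDfsL_fuel_irrel rel land (pvUniverse cid rel)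
          (fun c' x hx => pvRelD_mem_universe cid rel c' x hx)
          ((pvUniverse cid rel).length) ((pvUniverse cid rel).length + 1)
          ((PySem.Dict.mk rel).getD c [])
          (PySem.Set.add s.1 c, PySem.Set.update s.2 ((PySem.Dict.mk land).getD c []))
          hchU (by omega) (by omega)]
        rw [← pvDfsL_append]
        apply ih
        · intro x hx
          rcases List.mem_append.mp hx with h | h
          · exact hchU x h
          · exact hst x (List.mem_cons_of_mem c h)
        · simp only [List.length_append, List.length_cons] at hb ⊢
          have hmul : (pvMissing (pvUniverse cid rel)
              (PySem.Set.add s.1 c, PySem.Set.update s.2 ((PySem.Dict.mk land).getD c [])) + 1)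
                * (pvChildSum rel + 1)
              ≤ pvMissing (pvUniverse cid rel) s * (pvChildSum rel + 1) :=
            Nat.mul_le_mul_right _ (by omega)
          have hexp : (pvMissing (pvUniverse cid rel)
              (PySem.Set.add s.1 c, PySem.Set.update s.2 ((PySem.Dict.mk land).getD c [])) + 1)
                * (pvChildSum rel + 1)
              = pvMissing (pvUniverse cid rel)
                  (PySem.Set.add s.1 c, PySem.Set.update s.2 ((PySem.Dict.mk land).getD c []))
                  * (pvChildSum rel + 1) + pvChildSum rel + 1 := by ring
          omega

-- B's phase-1 loop is the first projection of the pair-state loop (the control flow never reads .2)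
theorem pvReach_eq_fst (rel land : List (String × List String)) :
    ∀ (f : Nat) (stack : List String) (v t : PySem.Set String),
      pvReach rel f stack v = (pvLoop rel land f stack (v, t)).1 := by
  intro f
  induction f with
  | zero => intro stack v t; rfl
  | succ f ih =>
    intro stack v t
    match stack with
    | [] => rfl
    | c :: rest =>
      show pvReach rel (f + 1) (c :: rest) v = (pvLoop rel land (f + 1) (c :: rest) (v, t)).1
      rw [pvReach, pvLoop]
      by_cases hvis : PySem.Set.contains v c = true
      · rw [if_pos hvis, if_pos hvis]; exact ih rest v t
      · rw [if_neg hvis, if_neg hvis]; exact ih _ _ _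

-- the invariant of A's dfs: both components stay Nodup, visited grows, and the members of the
-- total component are the old ones plus the land of the newly visited companies
theorem pvDfsA_inv (rel land : List (String × List String)) :
    ∀ (f : Nat) (c : String) (s : PySem.Set String × PySem.Set String),
      s.1.Nodup → s.2.Nodup →
      (pvDfsA rel land f c s).1.Nodup ∧ (pvDfsA rel land f c s).2.Nodup ∧
      (∀ y, y ∈ (pvDfsA rel land f c s).2 ↔
        y ∈ s.2 ∨ ∃ x, x ∈ (pvDfsA rel land f c s).1 ∧ x ∉ s.1 ∧ y ∈ pvLandOf land x) := by
  intro f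
  induction f with
  | zero =>
    intro c s h1 h2
    refine ⟨h1, h2, fun y => ?_⟩
    simp [pvDfsA]
    exact fun x hx hnx _ => absurd hx hnx
  | succ f ih =>
    intro c s h1 h2
    rw [pvDfsA_succ]
    by_cases hvis : PySem.Set.contains s.1 c = true
    · rw [if_pos hvis]
      refine ⟨h1, h2, fun y => ?_⟩
      simp
      exact fun x hx hnx _ => absurd hx hnx
    · rw [if_neg hvis, pvLand_update_eq]
      have hv : c ∉ s.1 := fun hmem => hvis ((PySem.Set.contains_iff s.1 c).mpr hmem)
      -- the fold version of the invariant
      have hfold : ∀ (cs : List String) (s' : PySem.Set String × PySem.Set String),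
          s'.1.Nodup → s'.2.Nodup →
          (pvDfsL rel land f cs s').1.Nodup ∧ (pvDfsL rel land f cs s').2.Nodup ∧
          (∀ x, x ∈ s'.1 → x ∈ (pvDfsL rel land f cs s').1) ∧
          (∀ y, y ∈ (pvDfsL rel land f cs s').2 ↔
            y ∈ s'.2 ∨ ∃ x, x ∈ (pvDfsL rel land f cs s').1 ∧ x ∉ s'.1 ∧ y ∈ pvLandOf land x) := by
        intro cs
        induction cs with
        | nil =>
          intro s' g1 g2
          refine ⟨g1, g2, fun x hx => hx, fun y => ?_⟩
          simp [pvDfsL_nil]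
          exact fun x hx hnx _ => absurd hx hnx
        | cons a as iha =>
          intro s' g1 g2
          obtain ⟨t1, t2, tchar⟩ := ih a s' g1 g2
          obtain ⟨r1, r2, rmono, rchar⟩ := iha (pvDfsA rel land f a s') t1 t2
          rw [pvDfsL_cons]
          have smono : ∀ x, x ∈ s'.1 → x ∈ (pvDfsA rel land f a s').1 :=
            fun x hx => pvDfsA_visited_mono rel land f a s' x hx
          refine ⟨r1, r2, fun x hx => rmono x (smono x hx), fun y => ?_⟩
          rw [rchar y]
          constructor
          · rintro (hy | ⟨x, hxr, hxt, hxl⟩)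
            · rcases (tchar y).mp hy with hy' | ⟨x, hxt', hxs, hxl⟩
              · exact Or.inl hy'
              · exact Or.inr ⟨x, rmono x hxt', hxs, hxl⟩
            · exact Or.inr ⟨x, hxr, fun hxs => hxt (smono x hxs), hxl⟩
          · rintro (hy | ⟨x, hxr, hxs, hxl⟩)
            · exact Or.inl ((tchar y).mpr (Or.inl hy))
            · by_cases hxt : x ∈ (pvDfsA rel land f a s').1
              · exact Or.inl ((tchar y).mpr (Or.inr ⟨x, hxt, hxs, hxl⟩))
              · exact Or.inr ⟨x, hxr, hxt, hxl⟩
      have hadd1 : (PySem.Set.add s.1 c).Nodup := PySem.Set.nodup_add _ _ h1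
      have hadd2 : (PySem.Set.update s.2 ((PySem.Dict.mk land).getD c [])).Nodup :=
        PySem.Set.nodup_update _ _ h2
      obtain ⟨r1, r2, rmono, rchar⟩ := hfold ((PySem.Dict.mk rel).getD c [])
        (PySem.Set.add s.1 c, PySem.Set.update s.2 ((PySem.Dict.mk land).getD c [])) hadd1 hadd2
      refine ⟨r1, r2, fun y => ?_⟩
      rw [rchar y]
      have hcmem : c ∈ (pvDfsL rel land f ((PySem.Dict.mk rel).getD c [])
          (PySem.Set.add s.1 c, PySem.Set.update s.2 ((PySem.Dict.mk land).getD c []))).1 :=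
        rmono c (by simp [PySem.Set.mem_add])
      constructor
      · rintro (hy | ⟨x, hxr, hxadd, hxl⟩)
        · rcases (PySem.Set.mem_update _ _ _).mp hy with hy' | hy'
          · exact Or.inl hy'
          · exact Or.inr ⟨c, hcmem, hv, by simpa [pvLandOf] using hy'⟩
        · refine Or.inr ⟨x, hxr, fun hxs => hxadd ?_, hxl⟩
          simp [PySem.Set.mem_add]; exact Or.inl hxs
      · rintro (hy | ⟨x, hxr, hxs, hxl⟩)
        · exact Or.inl ((PySem.Set.mem_update _ _ _).mpr (Or.inl hy))
        · by_cases hxc : x = c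
          · subst hxc
            exact Or.inl ((PySem.Set.mem_update _ _ _).mpr (Or.inr (by simpa [pvLandOf] using hxl)))
          · refine Or.inr ⟨x, hxr, ?_, hxl⟩
            simp [PySem.Set.mem_add]
            exact ⟨hxs, hxc⟩

-- B's phase-2 fold: Nodup, and its members are the land of the companies in the list
theorem pvFold_total_inv (land : List (String × List String)) :
    ∀ (cs : List String) (t : PySem.Set String), t.Nodup →
      (cs.foldl (fun t c => PySem.Set.update t (pvLandOf land c)) t).Nodup ∧
      (∀ y, y ∈ cs.foldl (fun t c => PySem.Set.update t (pvLandOf land c)) t ↔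
        y ∈ t ∨ ∃ c ∈ cs, y ∈ pvLandOf land c) := by
  intro cs
  induction cs with
  | nil => intro t ht; exact ⟨ht, fun y => by simp⟩
  | cons a as iha =>
    intro t ht
    obtain ⟨r1, rchar⟩ := iha (PySem.Set.update t (pvLandOf land a)) (PySem.Set.nodup_update _ _ ht)
    refine ⟨r1, fun y => ?_⟩
    rw [List.foldl_cons, rchar y, PySem.Set.mem_update]
    constructor
    · rintro ((hy | hy) | ⟨c, hc, hy⟩)
      · exact Or.inl hy
      · exact Or.inr ⟨a, List.mem_cons_self, hy⟩
      · exact Or.inr ⟨c, List.mem_cons_of_mem a hc, hy⟩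
    · rintro (hy | ⟨c, hc, hy⟩)
      · exact Or.inl (Or.inl hy)
      · rcases List.mem_cons.mp hc with h | h
        · subst h; exact Or.inl (Or.inr hy)
        · exact Or.inr ⟨c, h, hy⟩

-- ===== VERDICT (by name: the statement is the Claim_ definition above) =====
theorem get_total_land_spec : Claim_equal_get_total_land := by
  intro company_id company_relations land_ownership _
  unfold Spec_get_total_land get_total_land get_total_land_alt
  -- B's phase-1 reachable set equals A's final visited set, as lists
  have hreach : pvReach company_relations
      (((pvUniverse company_id company_relations).length + 1) * (pvChildSum company_relations + 1) + 1)
      [company_id] PySem.Set.empty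
      = (pvDfsA company_relations land_ownership
          ((pvUniverse company_id company_relations).length + 1)
          company_id (PySem.Set.empty, PySem.Set.empty)).1 := by
    rw [pvReach_eq_fst company_relations land_ownership _ [company_id]
      PySem.Set.empty PySem.Set.empty]
    rw [pvLoop_eq_pvDfsL company_id company_relations land_ownership _ [company_id]
      (PySem.Set.empty, PySem.Set.empty)
      (by intro x hx; simp only [List.mem_singleton] at hx; subst hx; exact List.mem_cons_self)
      (by
        have hmU := pvMissing_le_len (pvUniverse company_id company_relations)
          ((PySem.Set.empty : PySem.Set String), (PySem.Set.empty : PySem.Set String))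
        have hmul : pvMissing (pvUniverse company_id company_relations)
              ((PySem.Set.empty : PySem.Set String), (PySem.Set.empty : PySem.Set String))
              * (pvChildSum company_relations + 1)
            ≤ (pvUniverse company_id company_relations).length * (pvChildSum company_relations + 1) :=
          Nat.mul_le_mul_right _ hmU
        have hexp : ((pvUniverse company_id company_relations).length + 1)
              * (pvChildSum company_relations + 1)
            = (pvUniverse company_id company_relations).length * (pvChildSum company_relations + 1)
              + pvChildSum company_relations + 1 := by ring
        simp only [List.length_cons, List.length_nil]
        omega)]
    rw [pvDfsL_cons, pvDfsL_nil]
  rw [hreach]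
  -- both totals are Nodup and have the same members, hence the same length
  set r := pvDfsA company_relations land_ownership
      ((pvUniverse company_id company_relations).length + 1)
      company_id (PySem.Set.empty, PySem.Set.empty) with hr
  obtain ⟨hA1, hA2, hAchar⟩ := pvDfsA_inv company_relations land_ownership
    ((pvUniverse company_id company_relations).length + 1) company_id
    (PySem.Set.empty, PySem.Set.empty) (by simp [PySem.Set.empty]) (by simp [PySem.Set.empty])
  obtain ⟨hB1, hBchar⟩ := pvFold_total_inv land_ownership r.1 PySem.Set.empty
    (by simp [PySem.Set.empty])
  rw [← hr] at hAchar
  have hmem : ∀ y, y ∈ r.1.foldl (fun t c => PySem.Set.update t (pvLandOf land_ownership c))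
      PySem.Set.empty ↔ y ∈ r.2 := by
    intro y
    rw [hBchar y, hAchar y]
    simp [PySem.Set.empty]
  have hperm : (r.1.foldl (fun t c => PySem.Set.update t (pvLandOf land_ownership c))
      PySem.Set.empty).Perm r.2 :=
    (List.perm_ext_iff_of_nodup hB1 hA2).mpr hmem
  simp only [PySem.Set.len, hperm.length_eq]
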